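-- pv_equiv track=rewrite | github.com/Tumumu1/sdu_cst_2020_DuYangLiu | sm2_RFC6979.py | Integer_to_OctetString
-- ===== SOURCE A (Python) =====
-- def Integer_to_OctetString(x):
--     base = 256
--     minlen = 32
--     code_string = ''.join([chr(x) for x in range(256)])
--     result = ""
--     while x > 0:
--         temp = x % base
--         result = code_string[temp] + result
--         x //= base
--     if len(result) >= minlen:
--         return result
--     return 'a' * (minlen - len(result)) + result
-- ===== SOURCE B (Python) =====
-- def Integer_to_OctetString(x):
--     if x > 0:
--         result = x.to_bytes((x.bit_length() + 7) // 8, 'big').decode('latin-1')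
--     else:
--         result = ""
--     if len(result) >= 32:
--         return result
--     return 'a' * (32 - len(result)) + result
-- ===== Notes on version B (the rewrite author's own statement) =====
-- stated objective: idiomatic
-- what changed: Replaces the digit-by-digit mod/floordiv prepend loop with Python's builtin int.to_bytes on the bit_length-derived byte count, decoded via latin-1, keeping the identical 'a'-padding tail.
import Mathlib
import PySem

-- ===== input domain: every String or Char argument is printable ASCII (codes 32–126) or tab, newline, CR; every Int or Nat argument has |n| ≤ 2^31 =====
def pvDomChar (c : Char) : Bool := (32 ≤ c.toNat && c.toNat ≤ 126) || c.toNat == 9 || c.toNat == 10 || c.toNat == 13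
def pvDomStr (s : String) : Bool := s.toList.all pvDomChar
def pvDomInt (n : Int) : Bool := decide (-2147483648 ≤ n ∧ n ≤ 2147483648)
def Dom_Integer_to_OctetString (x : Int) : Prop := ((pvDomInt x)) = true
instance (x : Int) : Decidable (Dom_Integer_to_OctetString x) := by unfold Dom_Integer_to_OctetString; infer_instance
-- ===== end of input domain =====

-- B converts the integer with one builtin to_bytes/bit_length conversion instead of A's per-digit mod/floordiv prepend loop (objective: idiomatic); same 'a'-padding tail.


-- ===== PORT A =====
-- code_string = ''.join([chr(x) for x in range(256)])
def codeString : List Char := (List.range 256).map Char.ofNat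

-- the while loop of A: result is the accumulated string (as List Char);
-- code_string[temp] with 0 ≤ temp < 256 always in range, so pyGetD with an unused default is exact
def aLoop (x : Int) (result : List Char) : List Char :=
  if _h : x > 0 then
    aLoop (PySem.Int.floordiv x 256)
      (PySem.List.pyGetD codeString (PySem.Int.mod x 256) ' ' :: result)
  else result
termination_by x.toNat
decreasing_by
  have h256 : PySem.Int.floordiv x 256 = x / 256 :=
    PySem.Int.floordiv_eq_ediv_of_pos (by omega)
  rw [h256]; omega

def Integer_to_OctetString (x : Int) : String :=
  let result := aLoop x []
  if result.length ≥ 32 then String.mk result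
  else String.mk (List.replicate (32 - result.length) 'a' ++ result)

-- ===== PORT B =====
-- x.to_bytes(n, 'big').decode('latin-1') for a nonnegative x that fits in n bytes (always true here by construction)
def toBytesBE : Nat → Nat → List Char
  | 0, _ => []
  | n + 1, v => toBytesBE n (v / 256) ++ [Char.ofNat (v % 256)]

def Integer_to_OctetString_alt (x : Int) : String :=
  let result :=
    if x > 0 then toBytesBE ((PySem.Int.bitLength x + 7) / 8) x.toNat else []
  if result.length ≥ 32 then String.mk result
  else String.mk (List.replicate (32 - result.length) 'a' ++ result)

-- ===== PRECONDITION & SPEC =====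
def Spec_Integer_to_OctetString (x : Int) (out : String) : Prop := out = Integer_to_OctetString_alt x
instance (x : Int) (out : String) : Decidable (Spec_Integer_to_OctetString x out) := by unfold Spec_Integer_to_OctetString; infer_instance

-- ===== CLAIM (what is proved, stated in full; the proofs are below) =====
def Claim_equal_Integer_to_OctetString : Prop := ∀ (x : Int), Dom_Integer_to_OctetString x → Spec_Integer_to_OctetString x (Integer_to_OctetString x)

-- ===== LEMMAS AND PROOFS =====

-- code_string[k] = chr(k) for k < 256
theorem codeString_getD (k : Nat) (hk : k < 256) :
    PySem.List.pyGetD codeString ((k : Nat) : Int) ' ' = Char.ofNat k := by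
  rw [PySem.List.pyGetD_natCast]
  simp [codeString, List.getD, hk]

-- bit_length drops by exactly 8 on dividing by 256 (for m ≥ 256)
theorem bitLength_div256 (m : Nat) (hm : 256 ≤ m) :
    PySem.Int.bitLength ((m : Nat) : Int) =
      PySem.Int.bitLength (((m / 256 : Nat) : Nat) : Int) + 8 := by
  have h1 := PySem.Int.bitLength_natCast (m := m) (by omega)
  have h2 := PySem.Int.bitLength_natCast (m := m / 2) (by omega)
  have h3 := PySem.Int.bitLength_natCast (m := m / 2 / 2) (by omega)
  have h4 := PySem.Int.bitLength_natCast (m := m / 2 / 2 / 2) (by omega)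
  have h5 := PySem.Int.bitLength_natCast (m := m / 2 / 2 / 2 / 2) (by omega)
  have h6 := PySem.Int.bitLength_natCast (m := m / 2 / 2 / 2 / 2 / 2) (by omega)
  have h7 := PySem.Int.bitLength_natCast (m := m / 2 / 2 / 2 / 2 / 2 / 2) (by omega)
  have h8 := PySem.Int.bitLength_natCast (m := m / 2 / 2 / 2 / 2 / 2 / 2 / 2) (by omega)
  have he : m / 2 / 2 / 2 / 2 / 2 / 2 / 2 / 2 = m / 256 := by omega
  rw [h1, h2, h3, h4, h5, h6, h7, h8, he]

-- byte count: (bit_length + 7) // 8 drops by one per base-256 digit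
theorem byteLen_succ (m : Nat) (hm : 0 < m) :
    (PySem.Int.bitLength ((m : Nat) : Int) + 7) / 8 =
      (PySem.Int.bitLength (((m / 256 : Nat) : Nat) : Int) + 7) / 8 + 1 := by
  by_cases h : 256 ≤ m
  · have := bitLength_div256 m h
    omega
  · -- 0 < m < 256: one byte; m / 256 = 0 has bit_length 0
    have hb1 : 1 ≤ PySem.Int.bitLength ((m : Nat) : Int) := by
      rw [PySem.Int.bitLength_natCast (m := m) (by omega)]; omega
    have hb8 : PySem.Int.bitLength ((m : Nat) : Int) ≤ 8 := by
      by_contra hc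
      have hle := PySem.Int.two_pow_bitLength_le ((m : Nat) : Int) (by exact_mod_cast (by omega : (m : Int) ≠ 0))
      have habs : ((m : Int)).natAbs = m := Int.natAbs_natCast m
      rw [habs] at hle
      have : (2 : Nat) ^ 8 ≤ 2 ^ (PySem.Int.bitLength ((m : Nat) : Int) - 1) :=
        Nat.pow_le_pow_right (by omega) (by omega)
      omega
    have h0 : m / 256 = 0 := by omega
    rw [h0]
    have hz : PySem.Int.bitLength ((0 : Nat) : Int) = 0 := by decide
    rw [hz]
    omega

-- main loop invariant: A's loop produces exactly B's minimal big-endian bytes, prepended to the accumulator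
theorem aLoop_eq (m : Nat) : ∀ acc : List Char,
    aLoop ((m : Nat) : Int) acc =
      toBytesBE ((PySem.Int.bitLength ((m : Nat) : Int) + 7) / 8) m ++ acc := by
  induction m using Nat.strong_induction_on with
  | _ m ih =>
    intro acc
    by_cases hm : 0 < m
    · have hfd : PySem.Int.floordiv ((m : Nat) : Int) 256 = ((m / 256 : Nat) : Int) := by
        rw [PySem.Int.floordiv_eq_ediv_of_pos (by norm_num)]; omega
      have hmd : PySem.Int.mod ((m : Nat) : Int) 256 = ((m % 256 : Nat) : Int) := by
        rw [PySem.Int.mod_eq_emod_of_pos (by norm_num)]; omega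
      rw [aLoop, dif_pos (by exact_mod_cast hm), hfd, hmd]
      rw [codeString_getD (m % 256) (by omega)]
      rw [ih (m / 256) (by omega)]
      rw [byteLen_succ m hm]
      simp [toBytesBE]
    · have h0 : m = 0 := by omega
      subst h0
      rw [aLoop]
      norm_num
      decide

theorem Integer_to_OctetString_spec : Claim_equal_Integer_to_OctetString := by
  intro x _
  unfold Spec_Integer_to_OctetString Integer_to_OctetString Integer_to_OctetString_alt
  by_cases hx : x > 0
  · have hxe : ((x.toNat : Nat) : Int) = x := Int.toNat_of_nonneg (by omega)
    have := aLoop_eq x.toNat []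
    rw [hxe] at this
    rw [this, if_pos hx]
    simp
  · rw [aLoop, dif_neg hx, if_neg hx]
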